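-- pv_equiv track=rewrite | github.com/kimseongah/algorithm | 프로그래머스/2/172927. 광물 캐기/광물 캐기.py | solution
-- ===== SOURCE A (Python) =====
-- def solution(picks, minerals):
--     from collections import defaultdict
--     answer = 0
--     sums_of_five = defaultdict(lambda :0)
--     for i, m in enumerate(minerals):
--         if i >= sum(picks)*5:
--             break
--         index = i // 5
--         if m == "diamond":
--             minerals[i] = 25
--         elif m == "iron":
--             minerals[i] = 5
--         elif m == "stone":
--             minerals[i] = 1
--         sums_of_five[index] += minerals[i]
--
--     sorted_keys = sorted(sums_of_five, key=sums_of_five.get, reverse=True)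
--
--     for i in sorted_keys:
--         if picks[0] > 0:
--             picks[0] -= 1
--             pick = 25
--         elif picks[1] > 0:
--             picks[1] -= 1
--             pick = 5
--         elif picks[2] > 0:
--             picks[2] -= 1
--             pick = 1
--         else:
--             break
--         for j in range(5):
--             index = 5 * i + j
--             if index >= len(minerals):
--                 break
--             if pick >= minerals[index]:
--                 answer += 1
--             elif pick * 5 >= minerals[index]:
--                 answer += 5
--             else:
--                 answer += 25
--
--     return answer
-- ===== SOURCE B (Python) =====
-- # B: counting/bucket sort on the bounded group-sum keys (1..125) instead of a comparison
-- # sort, and closed-form per-group costs instead of the inner 5-step loop; unlike A it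
-- # does not mutate picks/minerals (equivalence is about the return value only).
-- def solution(picks, minerals):
--     limit = sum(picks) * 5
--     n = min(len(minerals), limit)
--     if n <= 0:
--         return 0
--     d, it, st = picks[0], picks[1], picks[2]
--     value = {"diamond": 25, "iron": 5, "stone": 1}
--     vals = [value[m] for m in minerals[:n]]
--     # bucket the groups of five by their total value (at most 125), keeping index order
--     buckets = [[] for _ in range(126)]
--     for g in range(0, len(vals), 5):
--         chunk = vals[g:g + 5]
--         ironcost = sum(1 if v <= 5 else 5 for v in chunk)
--         buckets[sum(chunk)].append((len(chunk), ironcost))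
--     answer = 0
--     for s in range(125, 0, -1):
--         for cnt, ironcost in buckets[s]:
--             if d > 0:
--                 d -= 1
--                 answer += cnt
--             elif it > 0:
--                 it -= 1
--                 answer += ironcost
--             elif st > 0:
--                 st -= 1
--                 answer += s
--             else:
--                 return answer
--     return answer
-- ===== Notes on version B (the rewrite author's own statement) =====
-- stated objective: alternative
-- what changed: Replaces the comparison sort of group indices by a counting/bucket pass over the bounded group-sum keys (1..125, stable descending), and replaces A's inner 5-step cost loop per picked group by closed-form per-group costs (count, iron-cost, sum) precomputed once; B also does not mutate picks/minerals.
-- outside the precondition, e.g. on solution([1], ['diamond']): A returns 1, B raises IndexError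
import Mathlib
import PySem

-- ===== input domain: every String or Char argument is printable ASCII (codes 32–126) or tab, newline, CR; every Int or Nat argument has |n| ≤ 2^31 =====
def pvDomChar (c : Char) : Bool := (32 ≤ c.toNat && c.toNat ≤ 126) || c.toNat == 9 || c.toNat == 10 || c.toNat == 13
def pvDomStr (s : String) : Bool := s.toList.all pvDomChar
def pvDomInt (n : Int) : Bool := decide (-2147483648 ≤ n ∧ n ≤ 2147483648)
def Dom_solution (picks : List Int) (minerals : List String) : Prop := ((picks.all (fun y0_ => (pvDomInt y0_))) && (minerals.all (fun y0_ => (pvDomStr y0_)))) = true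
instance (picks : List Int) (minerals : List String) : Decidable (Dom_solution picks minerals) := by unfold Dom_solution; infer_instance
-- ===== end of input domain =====

-- B replaces A's comparison sort of the mineral groups by a stable descending bucket pass over the
-- bounded group-sum keys and uses closed-form per-group costs; equivalence is about the RETURN value
-- only (A mutates picks and minerals in place, B does not).

-- ===== PORT A =====
-- A rewrites a recognised mineral name to its int value in place; an entry is either the
-- original string or the written int.
def pvMinVal (m : String) : Option Int :=
  if m = "diamond" then some 25
  else if m = "iron" then some 5
  else if m = "stone" then some 1
  else none

-- reading a still-string entry in an arithmetic position is a Python TypeError; Pre_solution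
-- excludes every input that reaches it, the 0 below is never observed inside Pre_solution
def pvCellInt (c : String ⊕ Int) : Int :=
  match c with
  | .inr v => v
  | .inl _ => 0

-- first loop of A: walks enumerate(minerals) (the element at i is read before it is overwritten,
-- so enumerating the original list is exact), breaks at i >= sum(picks)*5, rewrites the entry,
-- adds the entry just written to sums_of_five[i // 5]
def pvLoop1 (limit : Int) : List (Int × String) → List (String ⊕ Int) → PySem.Dict Int Int →
    List (String ⊕ Int) × PySem.Dict Int Int
  | [], mins, d => (mins, d)
  | (i, m) :: rest, mins, d =>
    if i ≥ limit then (mins, d)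
    else
      let mins' :=
        match pvMinVal m with
        | some v => PySem.List.pySetD mins i (Sum.inr v)
        | none => mins
      let d' := d.modify (PySem.Int.floordiv i 5) 0 (· + pvCellInt (PySem.List.pyGetD mins' i (Sum.inl "")))
      pvLoop1 limit rest mins' d'

-- inner 'for j in range(5)' loop of A with its break
def pvInnerGo (mins : List (String ⊕ Int)) (i pick : Int) : List Int → Int → Int
  | [], ans => ans
  | j :: rest, ans =>
    if 5 * i + j ≥ PySem.List.len mins then ans
    else
      pvInnerGo mins i pick rest
        (if pick ≥ pvCellInt (PySem.List.pyGetD mins (5 * i + j) (Sum.inl "")) then ans + 1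
         else if pick * 5 ≥ pvCellInt (PySem.List.pyGetD mins (5 * i + j) (Sum.inl "")) then ans + 5
         else ans + 25)

-- second loop of A: consumes picks[0]/picks[1]/picks[2] (mutated in place), break when none left
def pvLoop2 (mins : List (String ⊕ Int)) : List Int → Int → List Int → Int
  | [], ans, _ => ans
  | i :: rest, ans, pk =>
    if PySem.List.pyGetD pk 0 0 > 0 then
      pvLoop2 mins rest (pvInnerGo mins i 25 (PySem.List.pyRange 0 5 1) ans)
        (PySem.List.pySetD pk 0 (PySem.List.pyGetD pk 0 0 - 1))
    else if PySem.List.pyGetD pk 1 0 > 0 then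
      pvLoop2 mins rest (pvInnerGo mins i 5 (PySem.List.pyRange 0 5 1) ans)
        (PySem.List.pySetD pk 1 (PySem.List.pyGetD pk 1 0 - 1))
    else if PySem.List.pyGetD pk 2 0 > 0 then
      pvLoop2 mins rest (pvInnerGo mins i 1 (PySem.List.pyRange 0 5 1) ans)
        (PySem.List.pySetD pk 2 (PySem.List.pyGetD pk 2 0 - 1))
    else ans

def solution (picks : List Int) (minerals : List String) : Int :=
  let st := pvLoop1 (picks.sum * 5) (PySem.List.enumerate minerals 0)
    (minerals.map Sum.inl) PySem.Dict.empty
  let sortedKeys := PySem.List.sorted st.2.keys (fun k => st.2.getD k 0) true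
  pvLoop2 st.1 sortedKeys 0 picks

-- ===== PORT B =====
def pvValueDict : PySem.Dict String Int :=
  PySem.Dict.ofList [("diamond", 25), ("iron", 5), ("stone", 1)]

-- bucket pass of B: for g in range(0, len(vals), 5), append the group's (count, iron cost) to
-- buckets[sum of the group]
def pvBBuckets (vals : List Int) : List Int → List (List (Int × Int)) → List (List (Int × Int))
  | [], bk => bk
  | g :: rest, bk =>
    let chunk := PySem.List.slice vals (some g) (some (g + 5))
    let ironcost := (chunk.map (fun v => if v ≤ 5 then (1 : Int) else 5)).sum
    let bk' := PySem.List.pySetD bk chunk.sum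
      (PySem.List.pyGetD bk chunk.sum [] ++ [(PySem.List.len chunk, ironcost)])
    pvBBuckets vals rest bk'

-- body of B's bucket-consuming loop; the Bool is the 'already returned' flag of the early return
def pvBInner (s : Int) (st8 : Int × Int × Int × Int × Bool) (pr : Int × Int) :
    Int × Int × Int × Int × Bool :=
  match st8 with
  | (dm, it, stn, ans, done) =>
    if done then (dm, it, stn, ans, done)
    else if dm > 0 then (dm - 1, it, stn, ans + pr.1, false)
    else if it > 0 then (dm, it - 1, stn, ans + pr.2, false)
    else if stn > 0 then (dm, it, stn - 1, ans + s, false)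
    else (dm, it, stn, ans, true)

def solution_alt (picks : List Int) (minerals : List String) : Int :=
  let n := min (PySem.List.len minerals) (picks.sum * 5)
  if n ≤ 0 then 0
  else
    let dm := PySem.List.pyGetD picks 0 0
    let it := PySem.List.pyGetD picks 1 0
    let stn := PySem.List.pyGetD picks 2 0
    let vals := (PySem.List.slice minerals none (some n)).map (fun m => pvValueDict.getD m 0)
    let buckets := pvBBuckets vals (PySem.List.pyRange 0 (PySem.List.len vals) 5)
      (List.replicate 126 [])
    let fin := (PySem.List.pyRange 125 0 (-1)).foldl
      (fun st8 s => (PySem.List.pyGetD buckets s []).foldl (pvBInner s) st8)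
      (dm, it, stn, 0, false)
    fin.2.2.2.1

-- ===== PRECONDITION & SPEC =====
-- Pre_solution excludes (a) inputs whose first min(len(minerals), 5*sum(picks)) minerals contain a
-- name other than diamond/iron/stone, on which A raises TypeError, and (b) inputs with fewer than
-- 3 pick counts that still reach the pick-consuming loop, on which A's return is an accident of
-- short-circuiting over the missing picks[1]/picks[2] while any natural 3-pick implementation
-- (including B) raises there.
def Pre_solution (picks : List Int) (minerals : List String) : Prop :=
  (∀ m ∈ minerals.take (min minerals.length (picks.sum * 5).toNat),
      m = "diamond" ∨ m = "iron" ∨ m = "stone")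
  ∧ (3 ≤ picks.length ∨ picks.sum ≤ 0 ∨ minerals = [])
instance (picks : List Int) (minerals : List String) : Decidable (Pre_solution picks minerals) := by
  unfold Pre_solution; infer_instance

def pvWitness_solution : List Int × List String :=
  ([1, 1, 1], ["diamond", "stone", "stone", "stone", "stone", "iron"])

def Spec_solution (picks : List Int) (minerals : List String) (out : Int) : Prop :=
  out = solution_alt picks minerals
instance (picks : List Int) (minerals : List String) (out : Int) :
    Decidable (Spec_solution picks minerals out) := by unfold Spec_solution; infer_instance

-- ===== CLAIM (what is proved, stated in full; the proofs are below) =====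
def Claim_equal_solution : Prop := ∀ (picks : List Int) (minerals : List String),
  Dom_solution picks minerals → Pre_solution picks minerals →
  Spec_solution picks minerals (solution picks minerals)

-- ===== LEMMAS AND PROOFS =====

-- spec-level values shared by both directions of the proof
def pvVal (m : String) : Int := pvValueDict.getD m 0
def pvChunk (vals : List Int) (g : Nat) : List Int := (vals.drop (5 * g)).take 5
def pvIron (ch : List Int) : Int := (ch.map (fun v => if v ≤ 5 then (1 : Int) else 5)).sum
def pvDescr (vals : List Int) (g : Nat) : Int × Int × Int :=
  ((pvChunk vals g).length, pvIron (pvChunk vals g), (pvChunk vals g).sum)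
def pvCost (pick v : Int) : Int := if pick ≥ v then 1 else if pick * 5 ≥ v then 5 else 25

-- the common consumer both programs reduce to
def pvCore : Int × Int × Int → List (Int × Int × Int) → Int → Int
  | _, [], ans => ans
  | (a, b, c), (cnt, ic, s) :: rest, ans =>
    if a > 0 then pvCore (a - 1, b, c) rest (ans + cnt)
    else if b > 0 then pvCore (a, b - 1, c) rest (ans + ic)
    else if c > 0 then pvCore (a, b, c - 1) rest (ans + s)
    else ans


-- spec-level input measures
def pvNN (picks : List Int) (minerals : List String) : Nat :=
  min minerals.length (picks.sum * 5).toNat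
def pvVals (picks : List Int) (minerals : List String) : List Int :=
  (minerals.take (pvNN picks minerals)).map pvVal
def pvG (n : Nat) : Nat := (n + 4) / 5

-- the order in which B consumes the groups: sums descending, group index ascending within a sum
def pvOrd (vals : List Int) : List Int :=
  (PySem.List.pyRange 125 0 (-1)).flatMap
    (fun s => ((List.range (pvG vals.length)).map (fun g : Nat => (g : Int))).filter
      (fun kk => (pvChunk vals kk.toNat).sum == s))

-- ---- generic small lemmas ----

lemma pvVal_eq (m : String) : pvVal m = (pvMinVal m).getD 0 := by
  have hd : pvValueDict = PySem.Dict.mk [("diamond", 25), ("iron", 5), ("stone", 1)] := by rfl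
  unfold pvVal pvMinVal
  rw [hd, PySem.Dict.getD_eq_get?_getD,
    PySem.Dict.get?_mk_cons, PySem.Dict.get?_mk_cons, PySem.Dict.get?_mk_cons]
  by_cases h1 : m = "diamond" <;> by_cases h2 : m = "iron" <;> by_cases h3 : m = "stone" <;>
    (simp_all [beq_iff_eq, @eq_comm String]; try rfl)

lemma pvInsertBy_append (before : Int → Int → Bool) (x : Int) (P S : List Int)
    (h : ∀ p ∈ P, before x p = false) :
    PySem.List.insertBy before x (P ++ S) = P ++ PySem.List.insertBy before x S := by
  induction P with
  | nil => rfl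
  | cons p P ih =>
    have hp : before x p = false := h p (by simp)
    simp only [List.cons_append, PySem.List.insertBy, hp, Bool.false_eq_true, if_false]
    rw [ih (fun q hq => h q (by simp [hq]))]

-- stability of Python's reverse sort, specialised to lists of distinct Ints:
-- any reordering that is strictly descending in the key, ties kept in increasing order,
-- IS sorted(xs, key=key, reverse=True)
lemma pvSorted_rev_stable (xs ys : List Int) (key : Int → Int)
    (hperm : ys.Perm xs) (hxs : xs.Pairwise (· < ·))
    (hys : ys.Pairwise (fun a b => key b < key a ∨ (key a = key b ∧ a < b))) :
    PySem.List.sorted xs key true = ys := by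
  induction xs using List.reverseRecOn generalizing ys with
  | nil =>
    rw [List.Perm.eq_nil hperm]
    rfl
  | append_singleton l m ih =>
    have hm : m ∈ ys := hperm.mem_iff.mpr (by simp)
    obtain ⟨P, S, rfl⟩ := List.append_of_mem hm
    have hl : l.Pairwise (· < ·) := List.Pairwise.sublist (List.sublist_append_left l [m]) hxs
    have hlt : ∀ x ∈ l, x < m := by
      have h := (List.pairwise_append.mp hxs).2.2
      intro x hx
      exact h x hx m (by simp)
    have hperm' : (P ++ S).Perm l := by
      have h1 : (P ++ m :: S).Perm (m :: (P ++ S)) := List.perm_middle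
      have h2 : (l ++ [m]).Perm (m :: l) := List.perm_append_singleton m l
      exact List.Perm.cons_inv (h1.symm.trans (hperm.trans h2))
    have hysP : (P ++ S).Pairwise (fun a b => key b < key a ∨ (key a = key b ∧ a < b)) := by
      refine List.Pairwise.sublist ?_ hys
      exact List.Sublist.append_left (List.sublist_cons_self m S) P
    have hPm : ∀ p ∈ P, key m < key p ∨ (key p = key m ∧ p < m) := by
      have h := (List.pairwise_append.mp hys).2.2
      intro p hp
      exact h p hp m (by simp)
    have hmS : ∀ s ∈ S, key s < key m := by
      intro s hs
      have h2 := (List.pairwise_cons.mp (List.pairwise_append.mp hys).2.1).1 s hs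
      rcases h2 with h2 | ⟨_, h2⟩
      · exact h2
      · exfalso
        have hsl : s ∈ l := hperm'.mem_iff.mp (by simp [hs])
        exact absurd (hlt s hsl) (by omega)
    rw [PySem.List.sorted_rev_eq_foldl_insertBy, List.foldl_append]
    rw [← PySem.List.sorted_rev_eq_foldl_insertBy, ih (P ++ S) hperm' hl hysP]
    simp only [List.foldl_cons, List.foldl_nil]
    rw [pvInsertBy_append _ _ _ _ (by
      intro p hp
      rcases hPm p hp with h | ⟨h, _⟩ <;> simp <;> omega)]
    cases S with
    | nil => rfl
    | cons s S' =>
      have hms : key s < key m := hmS s (by simp)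
      simp only [PySem.List.insertBy, decide_eq_true_eq, if_pos hms]

-- ---- loop 1 of A ----

lemma pvLoop1_go (limit : Int) : ∀ (rest : List String) (pre : List Int) (d : PySem.Dict Int Int),
    (∀ m ∈ rest.take (min rest.length (limit - pre.length).toNat), pvMinVal m ≠ none) →
    pvLoop1 limit (PySem.List.enumerate rest pre.length) (pre.map Sum.inr ++ rest.map Sum.inl) d
    = ((pre ++ (rest.take (min rest.length (limit - pre.length).toNat)).map pvVal).map Sum.inr
         ++ (rest.drop (min rest.length (limit - pre.length).toNat)).map Sum.inl,
       (PySem.List.enumerate ((rest.take (min rest.length (limit - pre.length).toNat)).map pvVal)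
           pre.length).foldl
         (fun d p => d.modify (PySem.Int.floordiv p.1 5) 0 (· + p.2)) d) := by
  intro rest
  induction rest with
  | nil =>
    intro pre d h
    simp [pvLoop1, PySem.List.enumerate_nil]
  | cons m rest' ih =>
    intro pre d h
    rw [PySem.List.enumerate_cons]
    by_cases hbr : (pre.length : Int) ≥ limit
    · have ht : min (m :: rest').length (limit - (pre.length : Int)).toNat = 0 := by omega
      rw [ht]
      simp [pvLoop1, hbr]
    · have hlt : ¬ ((pre.length : Int) ≥ limit) := hbr
      have ht1 : 1 ≤ (limit - (pre.length : Int)).toNat := by omega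
      have ht : min (m :: rest').length (limit - (pre.length : Int)).toNat
          = min rest'.length (limit - ((pre.length : Int) + 1)).toNat + 1 := by
        simp only [List.length_cons]
        omega
      have hvm : pvMinVal m ≠ none := by
        apply h m
        rw [ht]
        simp
      obtain ⟨v, hv⟩ : ∃ v, pvMinVal m = some v := by
        cases hmv : pvMinVal m with
        | none => exact absurd hmv hvm
        | some v => exact ⟨v, rfl⟩
      have hvval : pvVal m = v := by rw [pvVal_eq, hv]; rfl
      have hset : PySem.List.pySetD (pre.map Sum.inr ++ (m :: rest').map Sum.inl)
          ((pre.length : Nat) : Int) (Sum.inr v)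
          = (pre ++ [v]).map Sum.inr ++ rest'.map Sum.inl := by
        rw [PySem.List.pySetD_natCast, List.set_append]
        simp [List.map_append]
      have hget : PySem.List.pyGetD ((pre ++ [v]).map Sum.inr ++ rest'.map Sum.inl)
          ((pre.length : Nat) : Int) (Sum.inl "") = Sum.inr v := by
        rw [show (pre ++ [v]).map Sum.inr ++ rest'.map Sum.inl
            = pre.map Sum.inr ++ (Sum.inr v :: rest'.map Sum.inl) from by simp [List.map_append]]
        rw [show ((pre.length : Nat) : Int) = ((pre.map (Sum.inr : Int → String ⊕ Int)).length : Int)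
          from by simp]
        rw [PySem.List.pyGetD_natCast, List.getD_eq_getElem _ _ (by simp)]
        rw [List.getElem_append_right (by simp)]
        simp
      show pvLoop1 limit _ _ _ = _
      rw [pvLoop1]
      rw [if_neg hbr, hv]
      simp only
      rw [hset, hget]
      have hstart : (pre.length : Int) + 1 = (((pre ++ [v]).length : Nat) : Int) := by
        simp
      rw [hstart]
      rw [ih (pre ++ [v]) (d.modify (PySem.Int.floordiv (pre.length : Int) 5) 0
          (· + pvCellInt (Sum.inr v))) (by
        intro w hw
        apply h w
        rw [ht]
        rw [show ((pre ++ [v]).length : Int) = (pre.length : Int) + 1 from by simp] at hw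
        simp [hw])]
      rw [show ((pre ++ [v]).length : Int) = (pre.length : Int) + 1 from by simp]
      rw [ht]
      rw [Prod.mk.injEq]
      constructor
      · simp only [List.take_succ_cons, List.drop_succ_cons, List.map_cons, hvval]
        simp [List.append_assoc]
      · rw [List.take_succ_cons, List.map_cons, PySem.List.enumerate_cons, List.foldl_cons]
        simp [hvval, pvCellInt]

-- ---- the dict built by loop 1 ----

lemma pvGetD_fold_modify (key : Int × Int → Int) (l : List (Int × Int)) (d : PySem.Dict Int Int)
    (k : Int) :
    ((l.foldl (fun d p => d.modify (key p) 0 (· + p.2)) d).getD k 0)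
    = d.getD k 0 + ((l.filter (fun p => key p == k)).map (·.2)).sum := by
  induction l generalizing d with
  | nil => simp
  | cons p l ih =>
    simp only [List.foldl_cons, List.filter_cons]
    rw [ih]
    by_cases h : key p = k
    · rw [PySem.Dict.getD_modify]
      simp [h]
      ring
    · have h' : ¬ k = key p := fun hh => h hh.symm
      rw [PySem.Dict.getD_modify]
      simp [h, h']

lemma pvFilter_enum (vals : List Int) (g : Nat) :
    ((PySem.List.enumerate vals 0).filter
        (fun p => PySem.Int.floordiv p.1 5 == (g : Int))).map (·.2) = pvChunk vals g := by
  classical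
  set p : Int × Int → Bool := fun q => PySem.Int.floordiv q.1 5 == (g : Int) with hp
  have hsplit : vals = vals.take (5 * g) ++ (pvChunk vals g ++ vals.drop (5 * g + 5)) := by
    rw [show pvChunk vals g ++ vals.drop (5 * g + 5)
        = (vals.drop (5 * g)).take 5 ++ (vals.drop (5 * g)).drop 5 from by
      rw [List.drop_drop]
      rfl]
    rw [List.take_append_drop, List.take_append_drop]
  conv_lhs => rw [hsplit]
  rw [PySem.List.enumerate_append, PySem.List.enumerate_append, List.filter_append,
    List.filter_append]
  have hA : (PySem.List.enumerate (vals.take (5 * g)) 0).filter p = [] := by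
    rw [List.filter_eq_nil_iff]
    intro q hq
    rw [PySem.List.mem_enumerate_iff] at hq
    obtain ⟨k, hk, rfl⟩ := hq
    have hk5 : k < 5 * g := lt_of_lt_of_le hk (by simp [List.length_take])
    have hfd : PySem.Int.floordiv ((k : Int)) 5 = ((k / 5 : Nat) : Int) := by
      exact_mod_cast PySem.Int.floordiv_natCast k 5
    simp only [hp, zero_add, hfd, beq_iff_eq, Nat.cast_inj]
    omega
  have hC : (PySem.List.enumerate (vals.drop (5 * g + 5))
      ((0 : Int) + (vals.take (5 * g)).length + (pvChunk vals g).length)).filter p = [] := by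
    rw [List.filter_eq_nil_iff]
    intro q hq
    rw [PySem.List.mem_enumerate_iff] at hq
    obtain ⟨k, hk, rfl⟩ := hq
    have hlen : (vals.drop (5 * g + 5)).length = vals.length - (5 * g + 5) := by simp
    have h55 : 5 * g + 5 ≤ vals.length := by omega
    have hTlen : (vals.take (5 * g)).length = 5 * g := by
      simp [List.length_take]
      omega
    have hClen : (pvChunk vals g).length = 5 := by
      simp [pvChunk, List.length_take, List.length_drop]
      omega
    rw [hTlen, hClen]
    have : (0 : Int) + (5 * g : Nat) + (5 : Nat) + (k : Int) = ((5 * g + 5 + k : Nat) : Int) := by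
      push_cast; ring
    rw [this]
    have hfd : PySem.Int.floordiv ((5 * g + 5 + k : Nat) : Int) 5
        = (((5 * g + 5 + k) / 5 : Nat) : Int) := by
      exact_mod_cast PySem.Int.floordiv_natCast (5 * g + 5 + k) 5
    simp only [hp, hfd, beq_iff_eq, Nat.cast_inj]
    omega
  have hB : (PySem.List.enumerate (pvChunk vals g) ((0 : Int) + (vals.take (5 * g)).length)).filter p
      = PySem.List.enumerate (pvChunk vals g) ((0 : Int) + (vals.take (5 * g)).length) := by
    rw [List.filter_eq_self]
    intro q hq
    rw [PySem.List.mem_enumerate_iff] at hq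
    obtain ⟨k, hk, rfl⟩ := hq
    have hBne : 5 * g < vals.length := by
      by_contra hc
      have : pvChunk vals g = [] := by
        simp [pvChunk, List.drop_eq_nil_iff]
        omega
      rw [this] at hk
      simp at hk
    have hTlen : (vals.take (5 * g)).length = 5 * g := by
      simp [List.length_take]
      omega
    have hk5 : k < 5 := lt_of_lt_of_le hk (by simp [pvChunk])
    rw [hTlen]
    have : (0 : Int) + (5 * g : Nat) + (k : Int) = ((5 * g + k : Nat) : Int) := by
      push_cast; ring
    rw [this]
    have hfd : PySem.Int.floordiv ((5 * g + k : Nat) : Int) 5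
        = (((5 * g + k) / 5 : Nat) : Int) := by
      exact_mod_cast PySem.Int.floordiv_natCast (5 * g + k) 5
    simp only [hp, hfd, beq_iff_eq, Nat.cast_inj]
    omega
  rw [hA, hB, hC]
  simp [PySem.List.map_snd_enumerate]

lemma pvOfList_div5 (n : Nat) :
    PySem.Set.ofList ((List.range n).map (fun k => ((k / 5 : Nat) : Int)))
    = (List.range (pvG n)).map (fun g : Nat => (g : Int)) := by
  induction n with
  | zero => rfl
  | succ n ih =>
    rw [List.range_succ, List.map_append, List.map_singleton,
      PySem.Set.ofList_append_singleton, ih, PySem.Set.add_eq_ite]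
    by_cases h : n % 5 = 0
    · have hnot : ((n / 5 : Nat) : Int) ∉ (List.range (pvG n)).map (fun g => ((g : Nat) : Int)) := by
        simp only [List.mem_map, List.mem_range]
        rintro ⟨g, hg, hgeq⟩
        have : g = n / 5 := by exact_mod_cast hgeq
        unfold pvG at hg
        omega
      rw [if_neg hnot]
      have h1 : pvG (n + 1) = pvG n + 1 := by unfold pvG; omega
      have h2 : pvG n = n / 5 := by unfold pvG; omega
      rw [h1, List.range_succ, List.map_append, h2, List.map_singleton]
    · have hmem : ((n / 5 : Nat) : Int) ∈ (List.range (pvG n)).map (fun g => ((g : Nat) : Int)) := by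
        simp only [List.mem_map, List.mem_range]
        exact ⟨n / 5, by unfold pvG; omega, rfl⟩
      rw [if_pos hmem]
      have h1 : pvG (n + 1) = pvG n := by unfold pvG; omega
      rw [h1]

lemma pvKeys_dfin (vals : List Int) :
    ((PySem.List.enumerate vals 0).foldl
        (fun d p => d.modify (PySem.Int.floordiv p.1 5) 0 (· + p.2)) PySem.Dict.empty).keys
    = (List.range (pvG vals.length)).map (fun g : Nat => (g : Int)) := by
  rw [PySem.Dict.keys_foldl_modify_key (PySem.List.enumerate vals 0)
    (fun p => PySem.Int.floordiv p.1 5) 0 (fun _ p => (· + p.2)) PySem.Dict.empty]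
  rw [show (PySem.Dict.empty : PySem.Dict Int Int).keys = [] from rfl, PySem.Set.update_nil_left]
  have hmap : (PySem.List.enumerate vals 0).map (fun p => PySem.Int.floordiv p.1 5)
      = (List.range vals.length).map (fun k => ((k / 5 : Nat) : Int)) := by
    have h1 : (PySem.List.enumerate vals 0).map (fun p => PySem.Int.floordiv p.1 5)
        = ((PySem.List.enumerate vals 0).map (fun p => p.1)).map (fun i => PySem.Int.floordiv i 5) := by
      rw [List.map_map]
      rfl
    rw [h1, PySem.List.map_fst_enumerate, zero_add, PySem.List.pyRange_one, List.map_map]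
    apply List.map_congr_left
    intro k hk
    simp
  rw [hmap, pvOfList_div5]

lemma pvGetD_dfin (vals : List Int) (g : Nat) :
    ((PySem.List.enumerate vals 0).foldl
        (fun d p => d.modify (PySem.Int.floordiv p.1 5) 0 (· + p.2)) PySem.Dict.empty).getD (g : Int) 0
    = (pvChunk vals g).sum := by
  rw [pvGetD_fold_modify (fun p => PySem.Int.floordiv p.1 5)]
  rw [show (PySem.Dict.empty : PySem.Dict Int Int).getD (g : Int) 0 = 0 from rfl, zero_add]
  rw [pvFilter_enum]

-- ---- chunk facts ----

lemma pvSum_bounds_aux (ch : List Int) (h : ∀ v ∈ ch, v = 1 ∨ v = 5 ∨ v = 25) :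
    (ch.length : Int) ≤ ch.sum ∧ ch.sum ≤ 25 * ch.length := by
  induction ch with
  | nil => simp
  | cons v rest ih =>
    have hv := h v (by simp)
    have hrest := ih (fun w hw => h w (by simp [hw]))
    simp only [List.sum_cons, List.length_cons]
    push_cast
    rcases hv with rfl | rfl | rfl <;> omega

lemma pvChunk_sum_bounds (ch : List Int) (h : ∀ v ∈ ch, v = 1 ∨ v = 5 ∨ v = 25)
    (hne : ch ≠ []) (hlen : ch.length ≤ 5) : 1 ≤ ch.sum ∧ ch.sum ≤ 125 := by
  have key := pvSum_bounds_aux ch h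
  have hlen1 : 1 ≤ ch.length := by
    cases ch with
    | nil => exact absurd rfl hne
    | cons a t => simp
  have h5 : (ch.length : Int) ≤ 5 := by exact_mod_cast hlen
  have h1 : (1 : Int) ≤ (ch.length : Int) := by exact_mod_cast hlen1
  omega

lemma pvCost_sum (pick : Int) (ch : List Int) (h : ∀ v ∈ ch, v = 1 ∨ v = 5 ∨ v = 25)
    (hp : pick = 25 ∨ pick = 5 ∨ pick = 1) :
    (ch.map (pvCost pick)).sum
    = if pick = 25 then (ch.length : Int) else if pick = 5 then pvIron ch else ch.sum := by
  induction ch with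
  | nil => rcases hp with rfl | rfl | rfl <;> simp [pvIron]
  | cons v rest ih =>
    have hv := h v (by simp)
    have hrest := ih (fun w hw => h w (by simp [hw]))
    simp only [List.map_cons, List.sum_cons, List.length_cons, pvIron] at *
    rcases hp with rfl | rfl | rfl <;> rcases hv with rfl | rfl | rfl <;>
      norm_num [pvCost] at * <;> omega

-- ---- inner loop of A reads exactly the group ----

lemma pvInnerGo_spec (vals : List Int) (suffix : List (String ⊕ Int)) (gN : Nat) (pick : Int)
    (hside : 5 * gN + 5 ≤ vals.length ∨ suffix = []) :
    ∀ (k : Nat), k ≤ 5 → ∀ ans,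
    pvInnerGo (vals.map Sum.inr ++ suffix) (gN : Int) pick (PySem.List.pyRange (5 - (k : Int)) 5 1) ans
    = ans + (((vals.drop (5 * gN + (5 - k))).take k).map (pvCost pick)).sum := by
  intro k
  induction k with
  | zero =>
    intro _ ans
    rw [show (5 : Int) - ((0 : Nat) : Int) = 5 from by norm_num]
    rw [PySem.List.pyRange_one_eq_nil (by norm_num)]
    simp [pvInnerGo]
  | succ k ihk =>
    intro hk ans
    have hk5 : k ≤ 5 := Nat.le_of_succ_le hk
    have hj5 : (5 : Int) - ((k + 1 : Nat) : Int) < 5 := by push_cast; omega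
    rw [PySem.List.pyRange_one_cons hj5]
    rw [pvInnerGo]
    have hminlen : (vals.map Sum.inr ++ suffix).length = vals.length + suffix.length := by simp
    by_cases hidx : (5 * (gN : Int) + ((5 : Int) - ((k + 1 : Nat) : Int)))
        ≥ PySem.List.len (vals.map (Sum.inr : Int → String ⊕ Int) ++ suffix)
    · rw [if_pos hidx]
      have hdrop : vals.drop (5 * gN + (5 - (k + 1))) = [] := by
        rw [List.drop_eq_nil_iff]
        rw [PySem.List.len_eq, hminlen] at hidx
        push_cast at hidx
        omega
      rw [hdrop]
      simp
    · rw [if_neg hidx]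
      rw [PySem.List.len_eq, hminlen] at hidx
      push_cast at hidx
      have hvlen : 5 * gN + (4 - k) < vals.length := by
        rcases hside with h | h
        · omega
        · subst h
          simp at hidx
          omega
      have hcast : 5 * ((gN : Nat) : Int) + ((5 : Int) - ((k + 1 : Nat) : Int))
          = ((5 * gN + (4 - k) : Nat) : Int) := by push_cast; omega
      rw [hcast]
      have hread : PySem.List.pyGetD (vals.map Sum.inr ++ suffix)
          (((5 * gN + (4 - k) : Nat) : Int)) (Sum.inl "") = Sum.inr (vals[5 * gN + (4 - k)]'hvlen) := by
        rw [PySem.List.pyGetD_natCast, List.getD_eq_getElem _ _ (by simp; omega)]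
        rw [List.getElem_append_left (by simpa using hvlen)]
        simp
      rw [hread]
      rw [show (5 : Int) - ((k + 1 : Nat) : Int) + 1 = (5 : Int) - ((k : Nat) : Int) from by
        push_cast; ring]
      rw [ihk hk5]
      have hchunk : (vals.drop (5 * gN + (5 - (k + 1)))).take (k + 1)
          = vals[5 * gN + (4 - k)]'hvlen :: ((vals.drop (5 * gN + (5 - k))).take k) := by
        rw [show 5 * gN + (5 - (k + 1)) = 5 * gN + (4 - k) from by omega]
        rw [List.drop_eq_getElem_cons hvlen, List.take_succ_cons,
          show 5 * gN + (4 - k) + 1 = 5 * gN + (5 - k) from by omega]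
      rw [hchunk]
      simp only [List.map_cons, List.sum_cons]
      set v := vals[5 * gN + (4 - k)]'hvlen
      have hcost : (if pick ≥ pvCellInt (Sum.inr v) then ans + 1
          else if pick * 5 ≥ pvCellInt (Sum.inr v) then ans + 5 else ans + 25)
          = ans + pvCost pick v := by
        unfold pvCost pvCellInt
        split_ifs <;> ring
      rw [hcost]
      ring

lemma pvGet1 (x y z : Int) (t : List Int) : PySem.List.pyGetD (x :: y :: z :: t) 1 0 = y := by
  simp [PySem.List.pyGetD, PySem.List.pyGet?, PySem.List.pyIdx?]
  rw [if_pos (by omega)]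
  rfl

lemma pvGet2 (x y z : Int) (t : List Int) : PySem.List.pyGetD (x :: y :: z :: t) 2 0 = z := by
  simp [PySem.List.pyGetD, PySem.List.pyGet?, PySem.List.pyIdx?]
  rw [if_pos (by omega)]
  rfl

lemma pvList3 (pk : List Int) (h3 : 3 ≤ pk.length) :
    ∃ p0 p1 p2 r, pk = p0 :: p1 :: p2 :: r := by
  cases pk with
  | nil => simp at h3
  | cons a t =>
    cases t with
    | nil => simp at h3
    | cons b t2 =>
      cases t2 with
      | nil => simp at h3
      | cons c r => exact ⟨a, b, c, r, rfl⟩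

-- ---- loop 2 of A is pvCore ----

lemma pvLoop2_core (vals : List Int) (suffix : List (String ⊕ Int))
    (hdvd : 5 ∣ vals.length ∨ suffix = [])
    (hv : ∀ v ∈ vals, v = 1 ∨ v = 5 ∨ v = 25) :
    ∀ (ks : List Int) (ans : Int) (pk : List Int), 3 ≤ pk.length →
    (∀ kk ∈ ks, ∃ g : Nat, kk = (g : Int) ∧ g < pvG vals.length) →
    pvLoop2 (vals.map Sum.inr ++ suffix) ks ans pk
    = pvCore (PySem.List.pyGetD pk 0 0, PySem.List.pyGetD pk 1 0, PySem.List.pyGetD pk 2 0)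
        (ks.map (fun kk => pvDescr vals kk.toNat)) ans := by
  have hchunkmem : ∀ g : Nat, ∀ v ∈ pvChunk vals g, v = 1 ∨ v = 5 ∨ v = 25 := by
    intro g v hvv
    exact hv v (List.mem_of_mem_drop (List.mem_of_mem_take hvv))
  have hinner : ∀ g : Nat, g < pvG vals.length → ∀ pick : Int,
      pick = 25 ∨ pick = 5 ∨ pick = 1 → ∀ ans : Int,
      pvInnerGo (vals.map Sum.inr ++ suffix) ((g : Nat) : Int) pick (PySem.List.pyRange 0 5) ans
      = ans + (if pick = 25 then ((pvChunk vals g).length : Int)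
          else if pick = 5 then pvIron (pvChunk vals g) else (pvChunk vals g).sum) := by
    intro g hgG pick hp ans
    have hside : 5 * g + 5 ≤ vals.length ∨ suffix = [] := by
      rcases hdvd with h | h
      · left
        obtain ⟨q, hq⟩ := h
        unfold pvG at hgG
        omega
      · right; exact h
    rw [show (0 : Int) = 5 - ((5 : Nat) : Int) from by norm_num]
    rw [pvInnerGo_spec vals suffix g pick hside 5 (le_refl 5)]
    rw [show 5 * g + (5 - 5) = 5 * g from by omega]
    rw [show (vals.drop (5 * g)).take 5 = pvChunk vals g from rfl]
    rw [pvCost_sum pick _ (hchunkmem g) hp]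
  intro ks
  induction ks with
  | nil => intro ans pk h3 hks; rfl
  | cons kk ks' ih =>
    intro ans pk h3 hks
    obtain ⟨g, rfl, hgG⟩ := hks kk (by simp)
    obtain ⟨p0, p1, p2, r, rfl⟩ := pvList3 pk h3
    have hg0 : PySem.List.pyGetD (p0 :: p1 :: p2 :: r) 0 0 = p0 := PySem.List.pyGetD_zero_cons _ _ _
    have hg1 : PySem.List.pyGetD (p0 :: p1 :: p2 :: r) 1 0 = p1 := pvGet1 _ _ _ _
    have hg2 : PySem.List.pyGetD (p0 :: p1 :: p2 :: r) 2 0 = p2 := pvGet2 _ _ _ _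
    have hs0 : ∀ w : Int, PySem.List.pySetD (p0 :: p1 :: p2 :: r) 0 w = w :: p1 :: p2 :: r := by
      intro w
      simp [PySem.List.pySetD, PySem.List.pySet?, PySem.List.pyIdx?]
      rw [if_pos (by omega)]
      rfl
    have hs1 : ∀ w : Int, PySem.List.pySetD (p0 :: p1 :: p2 :: r) 1 w = p0 :: w :: p2 :: r := by
      intro w
      simp [PySem.List.pySetD, PySem.List.pySet?, PySem.List.pyIdx?]
      rw [if_pos (by omega)]
      rfl
    have hs2 : ∀ w : Int, PySem.List.pySetD (p0 :: p1 :: p2 :: r) 2 w = p0 :: p1 :: w :: r := by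
      intro w
      simp [PySem.List.pySetD, PySem.List.pySet?, PySem.List.pyIdx?]
      rw [if_pos (by omega)]
      rfl
    have hks' : ∀ kk ∈ ks', ∃ g : Nat, kk = (g : Int) ∧ g < pvG vals.length := by
      intro kk hkk
      exact hks kk (by simp [hkk])
    simp only [pvLoop2, hg0, hg1, hg2, hs0, hs1, hs2]
    simp only [List.map_cons, Int.toNat_natCast]
    by_cases h1 : p0 > 0
    · rw [if_pos h1]
      rw [hinner g hgG 25 (by norm_num) ans]
      rw [ih _ _ (by simp) hks']
      simp only [pvDescr, pvCore, PySem.List.pyGetD_zero_cons, pvGet1, pvGet2, if_pos h1]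
      norm_num
    · rw [if_neg h1]
      by_cases h2 : p1 > 0
      · rw [if_pos h2]
        rw [hinner g hgG 5 (by norm_num) ans]
        rw [ih _ _ (by simp) hks']
        simp only [pvDescr, pvCore, PySem.List.pyGetD_zero_cons, pvGet1, pvGet2, if_neg h1,
          if_pos h2]
        norm_num
      · rw [if_neg h2]
        by_cases h3c : p2 > 0
        · rw [if_pos h3c]
          rw [hinner g hgG 1 (by norm_num) ans]
          rw [ih _ _ (by simp) hks']
          simp only [pvDescr, pvCore, PySem.List.pyGetD_zero_cons, pvGet1, pvGet2, if_neg h1,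
            if_neg h2, if_pos h3c]
          norm_num
        · rw [if_neg h3c]
          simp only [pvDescr, pvCore, if_neg h1, if_neg h2, if_neg h3c]

-- ---- buckets of B ----

lemma pvBBuckets_getD (vals : List Int) : ∀ (gs : List Int) (bk : List (List (Int × Int)))
    (hlen : bk.length = 126)
    (hgs : ∀ g ∈ gs, 0 ≤ (PySem.List.slice vals (some g) (some (g + 5))).sum ∧
      (PySem.List.slice vals (some g) (some (g + 5))).sum < 126)
    (s : Int), 0 ≤ s → s < 126 →
    PySem.List.pyGetD (pvBBuckets vals gs bk) s []
    = PySem.List.pyGetD bk s []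
      ++ ((gs.filter (fun g => (PySem.List.slice vals (some g) (some (g + 5))).sum == s)).map
          (fun g => (PySem.List.len (PySem.List.slice vals (some g) (some (g + 5))),
                     pvIron (PySem.List.slice vals (some g) (some (g + 5)))))) := by
  intro gs
  induction gs with
  | nil =>
    intro bk hlen hgs s hs0 hs1
    simp [pvBBuckets]
  | cons g gs' ih =>
    intro bk hlen hgs s hs0 hs1
    obtain ⟨hg0, hg1⟩ := hgs g (by simp)
    simp only [pvBBuckets, pvIron]
    rw [ih _ (by rw [PySem.List.length_pySetD]; exact hlen)
      (fun x hx => hgs x (by simp [hx])) s hs0 hs1]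
    rw [List.filter_cons]
    set ch := PySem.List.slice vals (some g) (some (g + 5)) with hch
    by_cases heq : ch.sum = s
    · have hbeq : (ch.sum == s) = true := by simp [heq]
      rw [hbeq]
      have hget : PySem.List.pyGetD (PySem.List.pySetD bk ch.sum
          (PySem.List.pyGetD bk ch.sum []
            ++ [(PySem.List.len ch, (ch.map (fun v => if v ≤ 5 then (1 : Int) else 5)).sum)])) s []
          = PySem.List.pyGetD bk ch.sum []
            ++ [(PySem.List.len ch, (ch.map (fun v => if v ≤ 5 then (1 : Int) else 5)).sum)] := by
        rw [show ch.sum = ((ch.sum.toNat : Nat) : Int) from by omega,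
          show s = ((s.toNat : Nat) : Int) from by omega,
          PySem.List.pyGetD_pySetD_natCast _ _ _ _ _ (by omega)]
        rw [if_pos (by omega)]
      rw [hget, heq]
      simp only [pvIron, List.cons_append, List.nil_append, List.append_assoc]
      rfl
    · have hbeq : (ch.sum == s) = false := by simp [heq]
      rw [hbeq]
      have hget : PySem.List.pyGetD (PySem.List.pySetD bk ch.sum
          (PySem.List.pyGetD bk ch.sum []
            ++ [(PySem.List.len ch, (ch.map (fun v => if v ≤ 5 then (1 : Int) else 5)).sum)])) s []
          = PySem.List.pyGetD bk s [] := by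
        rw [show ch.sum = ((ch.sum.toNat : Nat) : Int) from by omega,
          show s = ((s.toNat : Nat) : Int) from by omega,
          PySem.List.pyGetD_pySetD_natCast _ _ _ _ _ (by omega)]
        rw [if_neg (by omega)]
      rw [hget]
      simp [pvIron]

-- ---- B's consuming loop is pvCore ----

lemma pvBFold_done (ds : List (Int × Int × Int)) (a b c ans : Int) :
    ds.foldl (fun st8 t => pvBInner t.2.2 st8 (t.1, t.2.1)) (a, b, c, ans, true)
    = (a, b, c, ans, true) := by
  induction ds with
  | nil => rfl
  | cons t ds ih => simpa [pvBInner] using ih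

lemma pvFlat_to_core : ∀ (ds : List (Int × Int × Int)) (a b c ans : Int),
    ((ds.foldl (fun st8 t => pvBInner t.2.2 st8 (t.1, t.2.1)) (a, b, c, ans, false)).2.2.2.1)
    = pvCore (a, b, c) ds ans := by
  intro ds
  induction ds with
  | nil => intro a b c ans; rfl
  | cons t ds ih =>
    intro a b c ans
    obtain ⟨cnt, ic, s⟩ := t
    show (List.foldl _ (pvBInner s (a, b, c, ans, false) (cnt, ic)) ds).2.2.2.1 = _
    by_cases h1 : a > 0
    · rw [show pvBInner s (a, b, c, ans, false) (cnt, ic) = (a - 1, b, c, ans + cnt, false) from by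
        simp [pvBInner, h1]]
      rw [ih]
      simp [pvCore, h1]
    · by_cases h2 : b > 0
      · rw [show pvBInner s (a, b, c, ans, false) (cnt, ic) = (a, b - 1, c, ans + ic, false) from by
          simp [pvBInner, h1, h2]]
        rw [ih]
        simp [pvCore, h1, h2]
      · by_cases h3 : c > 0
        · rw [show pvBInner s (a, b, c, ans, false) (cnt, ic) = (a, b, c - 1, ans + s, false) from by
            simp [pvBInner, h1, h2, h3]]
          rw [ih]
          simp [pvCore, h1, h2, h3]
        · rw [show pvBInner s (a, b, c, ans, false) (cnt, ic) = (a, b, c, ans, true) from by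
            simp [pvBInner, h1, h2, h3]]
          rw [pvBFold_done]
          simp [pvCore, h1, h2, h3]

lemma pvOuter_to_flat (buckets : List (List (Int × Int))) (L : List Int)
    (init : Int × Int × Int × Int × Bool) :
    L.foldl (fun st8 s => (PySem.List.pyGetD buckets s []).foldl (pvBInner s) st8) init
    = (L.flatMap (fun s => (PySem.List.pyGetD buckets s []).map (fun pr => (pr.1, pr.2, s)))).foldl
        (fun st8 t => pvBInner t.2.2 st8 (t.1, t.2.1)) init := by
  induction L generalizing init with
  | nil => rfl
  | cons s L ih =>
    simp only [List.foldl_cons, List.flatMap_cons, List.foldl_append, List.foldl_map]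
    rw [ih]

-- ---- the two consumption orders agree ----

lemma pvSortedKeys_eq_ord (vals : List Int) (key : Int → Int)
    (hkey : ∀ g : Nat, g < pvG vals.length → key (g : Int) = (pvChunk vals g).sum)
    (hbounds : ∀ g : Nat, g < pvG vals.length →
      1 ≤ (pvChunk vals g).sum ∧ (pvChunk vals g).sum ≤ 125) :
    PySem.List.sorted ((List.range (pvG vals.length)).map (fun g : Nat => (g : Int))) key true
    = pvOrd vals := by
  classical
  set G := pvG vals.length with hG
  set keysList : List Int := (List.range G).map (fun g : Nat => (g : Int)) with hkl
  have hmemk : ∀ x : Int, x ∈ keysList ↔ ∃ g : Nat, g < G ∧ x = (g : Int) := by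
    intro x
    simp [hkl, eq_comm]
  have hxs : keysList.Pairwise (· < ·) := by
    rw [hkl, List.pairwise_map]
    exact List.pairwise_lt_range.imp (by intro a b h; exact_mod_cast h)
  have hkey' : ∀ x ∈ keysList, key x = (pvChunk vals x.toNat).sum := by
    intro x hx
    obtain ⟨g, hg, rfl⟩ := (hmemk x).mp hx
    rw [hkey g hg]
    simp
  have hbnd : ∀ x ∈ keysList, 1 ≤ key x ∧ key x ≤ 125 := by
    intro x hx
    obtain ⟨g, hg, rfl⟩ := (hmemk x).mp hx
    rw [hkey g hg]
    exact hbounds g hg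
  have hfil : ∀ s : Int, ∀ x, x ∈ keysList.filter (fun kk => (pvChunk vals kk.toNat).sum == s)
      ↔ x ∈ keysList ∧ key x = s := by
    intro s x
    rw [List.mem_filter, beq_iff_eq]
    constructor
    · rintro ⟨h1, h2⟩
      exact ⟨h1, by rw [hkey' x h1]; exact h2⟩
    · rintro ⟨h1, h2⟩
      exact ⟨h1, by rw [← hkey' x h1]; exact h2⟩
  have hmemord : ∀ x : Int, x ∈ pvOrd vals ↔ x ∈ keysList := by
    intro x
    rw [pvOrd, List.mem_flatMap]
    constructor
    · rintro ⟨s, _, hx⟩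
      exact ((hfil s x).mp hx).1
    · intro hx
      refine ⟨key x, ?_, (hfil (key x) x).mpr ⟨hx, rfl⟩⟩
      rw [PySem.List.mem_pyRange_neg_one]
      have := hbnd x hx
      omega
  have hys : (pvOrd vals).Pairwise (fun a b => key b < key a ∨ (key a = key b ∧ a < b)) := by
    rw [pvOrd, List.flatMap_def, List.pairwise_flatten]
    constructor
    · intro l hl
      rw [List.mem_map] at hl
      obtain ⟨s, _, rfl⟩ := hl
      rw [List.pairwise_filter]
      refine hxs.imp_of_mem ?_
      intro a b ha hb hab h1 h2
      right
      refine ⟨?_, hab⟩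
      rw [hkey' a ha, hkey' b hb]
      rw [beq_iff_eq] at h1 h2
      rw [h1, h2]
    · rw [List.pairwise_map]
      have hpw : (PySem.List.pyRange 125 0 (-1)).Pairwise (fun a b => b < a) := by
        rw [PySem.List.pyRange_neg_one]
        rw [List.pairwise_map]
        exact List.pairwise_lt_range.imp (by intro a b h; omega)
      refine hpw.imp_of_mem ?_
      intro s1 s2 _ _ h12 x hx y hy
      left
      have hx' := (hfil s1 x).mp hx
      have hy' := (hfil s2 y).mp hy
      omega
  have hperm : (pvOrd vals).Perm keysList := by
    rw [List.perm_ext_iff_of_nodup ?_ ?_]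
    · exact hmemord
    · refine hys.imp ?_
      intro a b h
      rcases h with h | ⟨_, h⟩
      · rintro rfl
        omega
      · exact ne_of_lt h
    · refine hxs.imp ?_
      intro a b h
      omega
  exact pvSorted_rev_stable keysList (pvOrd vals) key hperm hxs hys

-- ===== VERDICT (by name: the statement is the Claim_ definition above) =====
theorem solution_spec : Claim_equal_solution := by
  unfold Claim_equal_solution Spec_solution
  intro picks minerals _ hpre
  obtain ⟨hvalid, hdisj⟩ := hpre
  set nN : Nat := min minerals.length (picks.sum * 5).toNat with hnN
  set vals : List Int := (minerals.take nN).map pvVal with hvals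
  have hnNle : nN ≤ minerals.length := by omega
  have hlenv : vals.length = nN := by
    rw [hvals, List.length_map, List.length_take]
    omega
  -- A's first loop, via pvLoop1_go with pre = []
  have hval' : ∀ m ∈ minerals.take (min minerals.length
      ((picks.sum * 5) - (([] : List Int).length : Int)).toNat), pvMinVal m ≠ none := by
    intro m hm
    have hm' : m ∈ minerals.take nN := by
      simpa using hm
    rcases hvalid m hm' with rfl | rfl | rfl <;> simp [pvMinVal]
  have hL1 := pvLoop1_go (picks.sum * 5) minerals [] PySem.Dict.empty hval'
  simp only [List.length_nil, Nat.cast_zero, Int.sub_zero, List.map_nil, List.nil_append,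
    List.nil_append] at hL1
  rw [← hnN, ← hvals] at hL1
  set mins : List (String ⊕ Int) := vals.map Sum.inr ++ (minerals.drop nN).map Sum.inl with hmins
  set dfin := (PySem.List.enumerate vals 0).foldl
    (fun d p => d.modify (PySem.Int.floordiv p.1 5) 0 (· + p.2)) PySem.Dict.empty with hdfin
  have hAmid : solution picks minerals
      = pvLoop2 mins (PySem.List.sorted dfin.keys (fun k => dfin.getD k 0) true) 0 picks := by
    simp only [solution]
    rw [hL1]
  -- element facts
  have hvele : ∀ v ∈ vals, v = 1 ∨ v = 5 ∨ v = 25 := by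
    intro v hvv
    rw [hvals, List.mem_map] at hvv
    obtain ⟨m, hm, rfl⟩ := hvv
    rcases hvalid m hm with rfl | rfl | rfl
    · right; right; rfl
    · right; left; rfl
    · left; rfl
  set G : Nat := pvG vals.length with hGdef
  have hchunk_ne : ∀ g : Nat, g < G → pvChunk vals g ≠ [] := by
    intro g hg
    rw [pvChunk, ← List.length_pos_iff]
    rw [List.length_take, List.length_drop]
    rw [hGdef, pvG] at hg
    omega
  have hbounds : ∀ g : Nat, g < G → 1 ≤ (pvChunk vals g).sum ∧ (pvChunk vals g).sum ≤ 125 := by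
    intro g hg
    refine pvChunk_sum_bounds _ (fun v hvv => hvele v ?_) (hchunk_ne g hg) (by simp [pvChunk])
    exact List.mem_of_mem_drop (List.mem_of_mem_take hvv)
  -- A's sort is the bucket order
  have hsorted : PySem.List.sorted dfin.keys (fun k => dfin.getD k 0) true = pvOrd vals := by
    rw [pvKeys_dfin vals, ← hGdef]
    exact pvSortedKeys_eq_ord vals _ (fun g hg => pvGetD_dfin vals g) hbounds
  by_cases hn0 : nN = 0
  · -- degenerate: no mineral is reachable, both sides return 0
    have hvnil : vals = [] := by
      rw [← List.length_eq_zero_iff, hlenv, hn0]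
    have hord : pvOrd vals = [] := by
      rw [pvOrd, hvnil]
      simp [pvG]
    rw [hAmid, hsorted, hord]
    have hB0 : min (PySem.List.len minerals) (picks.sum * 5) ≤ 0 := by
      rw [PySem.List.len_eq]
      omega
    rw [solution_alt]
    rw [if_pos hB0]
    rfl
  · -- main case
    have hsum5 : 0 < picks.sum * 5 := by omega
    have hmne : minerals ≠ [] := by
      intro h
      rw [h] at hnNle
      simp at hnNle
      omega
    have h3 : 3 ≤ picks.length := by
      rcases hdisj with h | h | h
      · exact h
      · omega
      · exact absurd h hmne
    have hdvd : 5 ∣ vals.length ∨ (minerals.drop nN).map (Sum.inl : String → String ⊕ Int) = [] := by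
      by_cases hlt : nN < minerals.length
      · left
        rw [hlenv]
        have : nN = (picks.sum * 5).toNat := by omega
        omega
      · right
        rw [List.map_eq_nil_iff, List.drop_eq_nil_iff]
        omega
    have hksmem : ∀ kk ∈ pvOrd vals, ∃ g : Nat, kk = (g : Int) ∧ g < G := by
      intro kk hkk
      rw [pvOrd, List.mem_flatMap] at hkk
      obtain ⟨s, _, hkk⟩ := hkk
      rw [List.mem_filter, List.mem_map] at hkk
      obtain ⟨⟨g, hg, rfl⟩, _⟩ := hkk
      exact ⟨g, rfl, by rw [List.mem_range] at hg; exact hg⟩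
    have hA : solution picks minerals
        = pvCore (PySem.List.pyGetD picks 0 0, PySem.List.pyGetD picks 1 0,
            PySem.List.pyGetD picks 2 0)
          ((pvOrd vals).map (fun kk => pvDescr vals kk.toNat)) 0 := by
      rw [hAmid, hsorted, hmins]
      exact pvLoop2_core vals _ hdvd hvele (pvOrd vals) 0 picks h3 hksmem
    -- B side
    have hnpos : ¬ (min (PySem.List.len minerals) (picks.sum * 5) ≤ 0) := by
      rw [PySem.List.len_eq]
      omega
    have htoNat : (min (PySem.List.len minerals) (picks.sum * 5)).toNat = nN := by
      rw [PySem.List.len_eq]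
      omega
    have hslice : PySem.List.slice minerals none (some (min (PySem.List.len minerals)
        (picks.sum * 5))) = minerals.take nN := by
      rw [PySem.List.slice_to _ (by rw [PySem.List.len_eq]; omega), htoNat]
    have hvalsB : (PySem.List.slice minerals none (some (min (PySem.List.len minerals)
        (picks.sum * 5)))).map (fun m => pvValueDict.getD m 0) = vals := by
      rw [hslice, hvals]
      rfl
    have hgs : PySem.List.pyRange 0 (PySem.List.len vals) 5
        = (List.range G).map (fun k : Nat => (0 : Int) + 5 * (k : Int)) := by
      rw [PySem.List.pyRange_of_pos 0 _ (by norm_num)]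
      congr 1
      rw [PySem.List.len_eq, hlenv]
      rw [if_pos (by omega : (0 : Int) < (nN : Int))]
      have hg5 : G = (nN + 4) / 5 := by rw [hGdef, hlenv]; rfl
      rw [hg5]
      congr 1
      omega
    have hchunkslice : ∀ k : Nat, PySem.List.slice vals (some ((0 : Int) + 5 * (k : Int)))
        (some ((0 : Int) + 5 * (k : Int) + 5)) = pvChunk vals k := by
      intro k
      rw [show (0 : Int) + 5 * (k : Int) = ((5 * k : Nat) : Int) from by push_cast; ring,
        show ((5 * k : Nat) : Int) + 5 = ((5 * k : Nat) : Int) + ((5 : Nat) : Int) from by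
          norm_num]
      rw [PySem.List.slice_natCast_add]
      rfl
    have hbk0 : ∀ s : Int, 0 ≤ s → s < 126 →
        PySem.List.pyGetD (List.replicate 126 ([] : List (Int × Int))) s [] = [] := by
      intro s h0 h1
      rw [PySem.List.pyGetD_eq_getElem _ _ h0 (by simp; omega)]
      exact List.getElem_replicate _
    have hgsfacts : ∀ g ∈ PySem.List.pyRange 0 (PySem.List.len vals) 5,
        0 ≤ (PySem.List.slice vals (some g) (some (g + 5))).sum ∧
          (PySem.List.slice vals (some g) (some (g + 5))).sum < 126 := by
      intro g hg
      rw [hgs, List.mem_map] at hg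
      obtain ⟨k, hk, rfl⟩ := hg
      rw [hchunkslice k]
      have := hbounds k (by rw [List.mem_range] at hk; exact hk)
      omega
    have hbucket : ∀ s : Int, 0 < s → s ≤ 125 →
        PySem.List.pyGetD (pvBBuckets vals (PySem.List.pyRange 0 (PySem.List.len vals) 5)
          (List.replicate 126 [])) s []
        = ((List.range G).filter (fun k => (pvChunk vals k).sum == s)).map
            (fun k => (((pvChunk vals k).length : Int), pvIron (pvChunk vals k))) := by
      intro s hs0 hs1
      rw [pvBBuckets_getD vals _ _ (by simp) hgsfacts s (by omega) (by omega)]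
      rw [hbk0 s (by omega) (by omega), List.nil_append]
      rw [hgs, List.filter_map, List.map_map]
      congr 1
      · funext k
        simp only [Function.comp_apply, hchunkslice k, PySem.List.len_eq]
      · apply List.filter_congr
        intro k hk
        simp only [Function.comp_apply, hchunkslice k]
    have hB : solution_alt picks minerals
        = pvCore (PySem.List.pyGetD picks 0 0, PySem.List.pyGetD picks 1 0,
            PySem.List.pyGetD picks 2 0)
          ((PySem.List.pyRange 125 0 (-1)).flatMap (fun s =>
            (((List.range G).filter (fun k => (pvChunk vals k).sum == s)).map
              (fun k => (((pvChunk vals k).length : Int), pvIron (pvChunk vals k)))).map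
                (fun pr => (pr.1, pr.2, s)))) 0 := by
      simp only [solution_alt]
      rw [if_neg hnpos, hvalsB]
      rw [pvOuter_to_flat]
      rw [show (PySem.List.pyRange 125 0 (-1)).flatMap (fun s =>
          (PySem.List.pyGetD (pvBBuckets vals (PySem.List.pyRange 0 (PySem.List.len vals) 5)
            (List.replicate 126 [])) s []).map (fun pr => (pr.1, pr.2, s)))
          = (PySem.List.pyRange 125 0 (-1)).flatMap (fun s =>
            (((List.range G).filter (fun k => (pvChunk vals k).sum == s)).map
              (fun k => (((pvChunk vals k).length : Int), pvIron (pvChunk vals k)))).map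
                (fun pr => (pr.1, pr.2, s))) from by
        rw [List.flatMap_def, List.flatMap_def]
        congr 1
        apply List.map_congr_left
        intro s hsmem
        rw [PySem.List.mem_pyRange_neg_one] at hsmem
        rw [hbucket s hsmem.1 hsmem.2]]
      rw [pvFlat_to_core]
    -- the two descriptor streams coincide
    have hds : ((pvOrd vals).map (fun kk => pvDescr vals kk.toNat))
        = (PySem.List.pyRange 125 0 (-1)).flatMap (fun s =>
            (((List.range G).filter (fun k => (pvChunk vals k).sum == s)).map
              (fun k => (((pvChunk vals k).length : Int), pvIron (pvChunk vals k)))).map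
                (fun pr => (pr.1, pr.2, s))) := by
      rw [pvOrd, ← hGdef, List.map_flatMap]
      apply List.flatMap_congr
      intro s hsmem
      rw [List.filter_map, List.map_map, List.map_map]
      rw [show List.filter ((fun kk : Int => (pvChunk vals kk.toNat).sum == s)
            ∘ (fun g : Nat => (g : Int))) (List.range G)
          = List.filter (fun k => (pvChunk vals k).sum == s) (List.range G) from by
        apply List.filter_congr
        intro k _
        simp]
      apply List.map_congr_left
      intro k hk
      rw [List.mem_filter] at hk
      have hsum := beq_iff_eq.mp hk.2
      simp only [Function.comp_apply, pvDescr, Int.toNat_natCast, hsum]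
    rw [hA, hB, hds]
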